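-- pv_equiv track=rewrite | github.com/Asal-Rah/Algorithms | Stable.py | search_for_min
-- ===== SOURCE A (Python) =====
-- def search_for_min(boards, cows , arr):
--
--     a = []
--     arr = sorted(arr)
--     for i in range(1, cows):
--         a.append(arr[i] - arr[i-1] - 1)
--     a=sorted(a, reverse=True)
--     total_amount = 1 + arr[-1] - arr[0]
--     minimum = min(boards - 1, cows - 1)
--     i = 0
--     while (minimum > 0):
--         total_amount = total_amount - a[i]
--         minimum = minimum - 1
--         i = i + 1
--
--     return total_amount
-- ===== SOURCE B (Python) =====
-- def search_for_min(boards, cows, arr):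
--     s = sorted(arr)
--     k = max(0, min(boards - 1, cows - 1))
--     cuts = sorted(sorted(range(1, cows),
--                          key=lambda i: s[i] - s[i - 1] - 1, reverse=True)[:k])
--     total, prev = 0, 0
--     for c in cuts:
--         total += s[c - 1] - s[prev] + 1
--         prev = c
--     return total + s[-1] - s[prev] + 1
-- ===== Notes on version B (the rewrite author's own statement) =====
-- stated objective: alternative
-- what changed: Instead of sorting gap values descending and subtracting the largest ones from the overall span, B argsorts the adjacency indices to pick cut positions, splits the sorted cows into segments at those cuts, and builds the answer up from 0 by accumulating each segment's own board length in a single left-to-right pass.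
import Mathlib
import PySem

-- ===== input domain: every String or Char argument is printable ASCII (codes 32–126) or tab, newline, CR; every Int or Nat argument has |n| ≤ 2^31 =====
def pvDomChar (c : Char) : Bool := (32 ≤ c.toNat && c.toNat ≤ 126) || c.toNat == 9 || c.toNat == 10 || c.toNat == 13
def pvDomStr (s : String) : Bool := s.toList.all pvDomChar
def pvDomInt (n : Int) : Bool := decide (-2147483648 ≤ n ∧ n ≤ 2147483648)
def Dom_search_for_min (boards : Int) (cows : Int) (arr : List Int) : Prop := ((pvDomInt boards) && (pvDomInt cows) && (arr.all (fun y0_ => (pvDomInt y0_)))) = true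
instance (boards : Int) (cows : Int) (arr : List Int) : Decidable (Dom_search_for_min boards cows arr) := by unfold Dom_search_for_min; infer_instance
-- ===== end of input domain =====

-- B picks cut positions by argsorting adjacency indices and accumulates each
-- segment's board length left to right, instead of A's subtraction of the
-- largest gap values from the overall span (objective: alternative).

-- ===== PORT A =====
-- A's while-loop, run exactly `fuel` times (fuel = minimum.toNat, since the
-- loop decrements `minimum` by 1 per iteration while it is positive)
def pvLoopA (a : List Int) : Nat → Int → Int → Int
  | 0, total, _ => total
  | k + 1, total, i => pvLoopA a k (total - PySem.List.pyGetD a i 0) (i + 1)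

def search_for_min (boards : Int) (cows : Int) (arr : List Int) : Int :=
  let arr' := PySem.List.sorted arr (fun x => x) false
  let a := (PySem.List.pyRange 1 cows 1).foldl
    (fun acc i => acc ++ [PySem.List.pyGetD arr' i 0 - PySem.List.pyGetD arr' (i - 1) 0 - 1]) []
  let a := PySem.List.sorted a (fun x => x) true
  let total_amount := 1 + PySem.List.pyGetD arr' (-1) 0 - PySem.List.pyGetD arr' 0 0
  let minimum := min (boards - 1) (cows - 1)
  pvLoopA a minimum.toNat total_amount 0

-- ===== PORT B =====
-- B's segment walk: for c in cuts: total += s[c-1] - s[prev] + 1; prev = c,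
-- then the closing segment total + s[-1] - s[prev] + 1
def pvSegB (s : List Int) : List Int → Int → Int → Int
  | [], prev, total => total + (PySem.List.pyGetD s (-1) 0 - PySem.List.pyGetD s prev 0 + 1)
  | c :: rest, prev, total =>
      pvSegB s rest c (total + (PySem.List.pyGetD s (c - 1) 0 - PySem.List.pyGetD s prev 0 + 1))

def search_for_min_alt (boards : Int) (cows : Int) (arr : List Int) : Int :=
  let s := PySem.List.sorted arr (fun x => x) false
  let k := max 0 (min (boards - 1) (cows - 1))
  let cuts := PySem.List.sorted
    ((PySem.List.sorted (PySem.List.pyRange 1 cows 1)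
        (fun i => PySem.List.pyGetD s i 0 - PySem.List.pyGetD s (i - 1) 0 - 1) true).take k.toNat)
    (fun x => x) false
  pvSegB s cuts 0 0

-- ===== PRECONDITION & SPEC =====
-- Pre_ excludes exactly the inputs on which the Python A raises IndexError: an
-- empty arr (arr[-1]) or cows exceeding len(arr) (arr[i] in the gap loop).
def Pre_search_for_min (boards : Int) (cows : Int) (arr : List Int) : Prop :=
  arr ≠ [] ∧ cows ≤ (arr.length : Int)
instance (boards : Int) (cows : Int) (arr : List Int) : Decidable (Pre_search_for_min boards cows arr) := by unfold Pre_search_for_min; infer_instance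

def pvWitness_search_for_min : Int × Int × List Int := (2, 3, [1, 5, 9])

def Spec_search_for_min (boards : Int) (cows : Int) (arr : List Int) (out : Int) : Prop := out = search_for_min_alt boards cows arr
instance (boards : Int) (cows : Int) (arr : List Int) (out : Int) : Decidable (Spec_search_for_min boards cows arr out) := by unfold Spec_search_for_min; infer_instance

-- ===== CLAIM (what is proved, stated in full; the proofs are below) =====
def Claim_equal_search_for_min : Prop := ∀ (boards : Int) (cows : Int) (arr : List Int), Dom_search_for_min boards cows arr → Pre_search_for_min boards cows arr → Spec_search_for_min boards cows arr (search_for_min boards cows arr)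

-- ===== LEMMAS AND PROOFS =====

-- A's loop subtracts the k entries a[i], a[i+1], …, a[i+k-1]
theorem pvLoopA_sum (a : List Int) :
    ∀ (k : Nat) (i : Nat) (total : Int), i + k ≤ a.length →
      pvLoopA a k total (i : Int) = total - ((a.drop i).take k).sum := by
  intro k
  induction k with
  | zero => intro i total _; simp [pvLoopA]
  | succ k ih =>
    intro i total h
    have hi : i < a.length := by omega
    have hdrop : a.drop i = a[i] :: a.drop (i + 1) := List.drop_eq_getElem_cons hi
    have hget : PySem.List.pyGetD a (i : Int) 0 = a[i] :=
      PySem.List.pyGetD_ofNat a i 0 hi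
    have hrec : ((i : Int) + 1) = ((i + 1 : Nat) : Int) := by push_cast; ring
    calc pvLoopA a (k + 1) total (i : Int)
        = pvLoopA a k (total - a[i]) ((i : Int) + 1) := by simp [pvLoopA, hget]
      _ = total - a[i] - ((a.drop (i + 1)).take k).sum := by
          rw [hrec, ih (i + 1) (total - a[i]) (by omega)]
      _ = total - ((a.drop i).take (k + 1)).sum := by
          rw [hdrop, List.take_succ_cons, List.sum_cons]; ring

-- B's segment walk equals the closing span minus the gaps at the cut indices
theorem pvSegB_spec (s : List Int) :
    ∀ (cuts : List Int) (prev total : Int),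
      pvSegB s cuts prev total =
        total + (PySem.List.pyGetD s (-1) 0 - PySem.List.pyGetD s prev 0 + 1) -
          (cuts.map (fun c => PySem.List.pyGetD s c 0 - PySem.List.pyGetD s (c - 1) 0 - 1)).sum := by
  intro cuts
  induction cuts with
  | nil => intro prev total; simp [pvSegB]
  | cons c rest ih => intro prev total; simp [pvSegB, ih]; ring

-- descending id-sort is the reverse of ascending id-sort (Int values)
theorem pvSortedRev (a0 : List Int) :
    PySem.List.sorted a0 (fun x => x) false = (PySem.List.sorted a0 (fun x => x) true).reverse := by
  apply PySem.List.sorted_id_eq_of_perm_of_pairwise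
  · exact (List.reverse_perm _).trans (PySem.List.sorted_perm a0 (fun x => x) true)
  · exact List.pairwise_reverse.mpr (PySem.List.sorted_pairwise_rev a0 (fun x => x))

-- mapping the key over a key-sorted (descending) list yields the id-sorted
-- (descending) list of the key values
theorem pvMapSortedRev (xs : List Int) (key : Int → Int) :
    (PySem.List.sorted xs key true).map key =
      PySem.List.sorted (xs.map key) (fun x => x) true := by
  have h1 : PySem.List.sorted (xs.map key) (fun x => x) false =
      ((PySem.List.sorted xs key true).map key).reverse := by
    apply PySem.List.sorted_id_eq_of_perm_of_pairwise
    · exact (List.reverse_perm _).trans ((PySem.List.sorted_perm xs key true).map key)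
    · exact List.pairwise_reverse.mpr
        (List.Pairwise.map key (fun _ _ h => h) (PySem.List.sorted_pairwise_rev xs key))
  have h2 : (PySem.List.sorted (xs.map key) (fun x => x) true).reverse =
      ((PySem.List.sorted xs key true).map key).reverse :=
    (pvSortedRev (xs.map key)).symm.trans h1
  exact (List.reverse_injective h2).symm

-- ===== VERDICT (by name: the statement is the Claim_ definition above) =====
theorem search_for_min_spec : Claim_equal_search_for_min := by
  intro boards cows arr _ hpre
  obtain ⟨hne, hcows⟩ := hpre
  unfold Spec_search_for_min search_for_min search_for_min_alt
  dsimp only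
  set s := PySem.List.sorted arr (fun x => x) false with hs
  set key : Int → Int := fun i => PySem.List.pyGetD s i 0 - PySem.List.pyGetD s (i - 1) 0 - 1 with hkey
  have hraw : (PySem.List.pyRange 1 cows 1).foldl
      (fun acc i => acc ++ [PySem.List.pyGetD s i 0 - PySem.List.pyGetD s (i - 1) 0 - 1]) []
      = (PySem.List.pyRange 1 cows 1).map key := by
    rw [PySem.List.foldl_append_singleton_eq_map]; simp only [List.nil_append]; rfl
  rw [hraw]
  set idxs := PySem.List.pyRange 1 cows 1 with hidxs
  set minimum := min (boards - 1) (cows - 1) with hmin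
  set m := minimum.toNat with hm
  have hmmax : (max 0 minimum).toNat = m := by omega
  -- A's side: span+1 minus the first m of the descending-sorted gap values
  have hlenidx : idxs.length = (cows - 1).toNat := by
    rw [hidxs, PySem.List.length_pyRange_one]
  have hmle : m ≤ (idxs.map key).length := by
    rw [List.length_map, hlenidx]; omega
  have hA := pvLoopA_sum (PySem.List.sorted (idxs.map key) (fun x => x) true) m 0
      (1 + PySem.List.pyGetD s (-1) 0 - PySem.List.pyGetD s 0 0)
      (by rw [PySem.List.length_sorted]; omega)
  simp only [Nat.cast_zero, List.drop_zero] at hA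
  rw [hA]
  -- B's side
  rw [hmmax, pvSegB_spec]
  -- the sums coincide
  have hperm : (PySem.List.sorted
      ((PySem.List.sorted idxs key true).take m) (fun x => x) false).Perm
      ((PySem.List.sorted idxs key true).take m) :=
    PySem.List.sorted_perm _ _ _
  have hsum : ((PySem.List.sorted
      ((PySem.List.sorted idxs key true).take m) (fun x => x) false).map key).sum
      = (((PySem.List.sorted idxs key true).take m).map key).sum :=
    (hperm.map key).sum_eq
  have hmap : (((PySem.List.sorted idxs key true).take m).map key)
      = (PySem.List.sorted (idxs.map key) (fun x => x) true).take m := by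
    rw [List.map_take, pvMapSortedRev]
  rw [hsum, hmap]
  ring
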